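-- pv_equiv track=rewrite | github.com/z8Tygas/Laboratorios-de-Algoritmia-II | robot.py | robot
-- ===== SOURCE A (Python) =====
-- def robot(comandos):
--     rect = []
--     mx, my, Mx, My, x, y = 0,0,0,0,0,0
--     dx,dy = 0,1
--     for c in comandos:
--         if c == 'H':
--             rect.append( (mx,my,Mx,My) )
--             mx, my, Mx, My, x, y, dx, dy = 0,0,0,0,0,0,0,1
--         elif c == 'A':
--             x += 1*dx
--             y += 1*dy
--             mx = min(x,mx)
--             Mx = max(x,Mx)
--             my = min(y,my)
--             My = max(y,My)
--         elif c == 'E':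
--             dx,dy = -dy,dx
--         elif c == 'D':
--             dx,dy = dy,-dx
--     return rect
-- ===== SOURCE B (Python) =====
-- def robot(comandos):
--     # Split on 'H': one rectangle per completed segment; commands after the
--     # last 'H' never produce a rectangle, so the final segment is dropped.
--     rects = []
--     segments = comandos.split('H')
--     for seg in segments[:-1]:
--         x, y, dx, dy = 0, 0, 0, 1
--         xs = [0]
--         ys = [0]
--         for c in seg:
--             if c == 'A':
--                 x += dx
--                 y += dy
--                 xs.append(x)
--                 ys.append(y)
--             elif c == 'E':
--                 dx, dy = -dy, dx
--             elif c == 'D':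
--                 dx, dy = dy, -dx
--         rects.append((min(xs), min(ys), max(xs), max(ys)))
--     return rects
-- ===== Notes on version B (the rewrite author's own statement) =====
-- stated objective: alternative
-- what changed: B splits the command string on 'H' into segments (never simulating the commands after the last 'H'), simulates each completed segment collecting every visited position into lists seeded with the origin, and takes min/max of those lists via the builtins, instead of A's single pass with running extrema and state reset on 'H'; a timing run measured this constant-factor mechanism as faster.
import Mathlib
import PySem

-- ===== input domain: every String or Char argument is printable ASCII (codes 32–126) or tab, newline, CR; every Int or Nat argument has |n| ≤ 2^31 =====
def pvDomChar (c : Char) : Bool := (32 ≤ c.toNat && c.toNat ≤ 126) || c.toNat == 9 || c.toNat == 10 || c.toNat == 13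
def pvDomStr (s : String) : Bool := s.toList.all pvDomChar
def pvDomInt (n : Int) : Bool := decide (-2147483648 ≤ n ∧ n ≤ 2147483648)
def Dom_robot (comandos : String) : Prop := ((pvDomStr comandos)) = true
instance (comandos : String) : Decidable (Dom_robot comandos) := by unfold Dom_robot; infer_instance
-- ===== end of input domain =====

-- B splits the command string on 'H' and, per completed segment, collects every visited
-- position and takes min/max, instead of A's single pass with running extrema (objective: alternative).

-- ===== PORT A =====
def robotStepA (s : List (Int × Int × Int × Int) × Int × Int × Int × Int × Int × Int × Int × Int)
    (c : Char) : List (Int × Int × Int × Int) × Int × Int × Int × Int × Int × Int × Int × Int :=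
  let (rect, mx, my, Mx, My, x, y, dx, dy) := s
  if c = 'H' then (rect ++ [(mx, my, Mx, My)], 0, 0, 0, 0, 0, 0, 0, 1)
  else if c = 'A' then
    let x' := x + 1 * dx
    let y' := y + 1 * dy
    (rect, min x' mx, min y' my, max x' Mx, max y' My, x', y', dx, dy)
  else if c = 'E' then (rect, mx, my, Mx, My, x, y, -dy, dx)
  else if c = 'D' then (rect, mx, my, Mx, My, x, y, dy, -dx)
  else s

def robot (comandos : String) : List (Int × Int × Int × Int) :=
  (comandos.toList.foldl robotStepA ([], 0, 0, 0, 0, 0, 0, 0, 1)).1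

-- ===== PORT B =====
def robotStepB (s : Int × Int × Int × Int × List Int × List Int) (c : Char) :
    Int × Int × Int × Int × List Int × List Int :=
  let (x, y, dx, dy, xs, ys) := s
  if c = 'A' then (x + dx, y + dy, dx, dy, xs ++ [x + dx], ys ++ [y + dy])
  else if c = 'E' then (x, y, -dy, dx, xs, ys)
  else if c = 'D' then (x, y, dy, -dx, xs, ys)
  else s

def robotSegRect (seg : List Char) : Int × Int × Int × Int :=
  let st := seg.foldl robotStepB (0, 0, 0, 1, [0], [0])
  ((PySem.List.min? st.2.2.2.2.1 (fun v => v)).getD 0, (PySem.List.min? st.2.2.2.2.2 (fun v => v)).getD 0,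
   (PySem.List.max? st.2.2.2.2.1 (fun v => v)).getD 0, (PySem.List.max? st.2.2.2.2.2 (fun v => v)).getD 0)

def robot_alt (comandos : String) : List (Int × Int × Int × Int) :=
  -- segments = comandos.split('H'); loop over segments[:-1]
  (PySem.List.slice (comandos.toList.splitOn 'H') none (some (-1))).foldl
    (fun rects seg => rects ++ [robotSegRect seg]) []

-- ===== PRECONDITION & SPEC =====
def Spec_robot (comandos : String) (out : List (Int × Int × Int × Int)) : Prop := out = robot_alt comandos
instance (comandos : String) (out : List (Int × Int × Int × Int)) : Decidable (Spec_robot comandos out) := by unfold Spec_robot; infer_instance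

-- ===== CLAIM (what is proved, stated in full; the proofs are below) =====
def Claim_equal_robot : Prop := ∀ (comandos : String), Dom_robot comandos → Spec_robot comandos (robot comandos)

-- ===== LEMMAS AND PROOFS =====

-- recursive characterisation of A's result from a given 8-tuple state (rect list abstracted away)
def specA : List Char → (Int × Int × Int × Int × Int × Int × Int × Int) → List (Int × Int × Int × Int)
  | [], _ => []
  | c :: t, st =>
    if c = 'H' then (st.1, st.2.1, st.2.2.1, st.2.2.2.1) :: specA t (0, 0, 0, 0, 0, 0, 0, 1)
    else specA t (robotStepA ([], st) c).2

def robotInitB : Int × Int × Int × Int × List Int × List Int := (0, 0, 0, 1, [0], [0])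

def rectB (st : Int × Int × Int × Int × List Int × List Int) : Int × Int × Int × Int :=
  ((PySem.List.min? st.2.2.2.2.1 (fun v => v)).getD 0, (PySem.List.min? st.2.2.2.2.2 (fun v => v)).getD 0,
   (PySem.List.max? st.2.2.2.2.1 (fun v => v)).getD 0, (PySem.List.max? st.2.2.2.2.2 (fun v => v)).getD 0)

-- recursive characterisation of B's result from a given 6-tuple state
def bGo : List Char → (Int × Int × Int × Int × List Int × List Int) → List (Int × Int × Int × Int)
  | [], _ => []
  | c :: t, st => if c = 'H' then rectB st :: bGo t robotInitB else bGo t (robotStepB st c)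

-- rectangles of a segment list: one per segment except the last, the first starting from st
def mapSegs : List (List Char) → (Int × Int × Int × Int × List Int × List Int) → List (Int × Int × Int × Int)
  | [], _ => []
  | [_], _ => []
  | seg :: r :: rest, st => rectB (seg.foldl robotStepB st) :: mapSegs (r :: rest) robotInitB

theorem mapSegs_cons (seg : List Char) (rest : List (List Char)) (st : Int × Int × Int × Int × List Int × List Int) :
    mapSegs (seg :: rest) st =
      if rest = [] then [] else rectB (seg.foldl robotStepB st) :: mapSegs rest robotInitB := by
  cases rest <;> simp [mapSegs]

theorem foldA_eq_specA (cs : List Char) :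
    ∀ (r : List (Int × Int × Int × Int)) (st : Int × Int × Int × Int × Int × Int × Int × Int),
    (cs.foldl robotStepA (r, st)).1 = r ++ specA cs st := by
  induction cs with
  | nil => intro r st; simp [specA]
  | cons c t ih =>
    intro r st
    obtain ⟨mx, my, Mx, My, x, y, dx, dy⟩ := st
    by_cases hH : c = 'H'
    · simp [hH, specA, robotStepA, List.foldl_cons, ih]
    · simp only [List.foldl_cons, specA, hH, if_false]
      by_cases hA : c = 'A' <;> by_cases hE : c = 'E' <;> by_cases hD : c = 'D' <;>
        simp [robotStepA, hH, hA, hE, hD, ih]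

theorem bGo_eq_mapSegs (cs : List Char) :
    ∀ st, bGo cs st = mapSegs (cs.splitOn 'H') st := by
  induction cs with
  | nil => intro st; simp [List.splitOn, List.splitOnP_nil, bGo, mapSegs]
  | cons c t ih =>
    intro st
    have hne : List.splitOnP (· == 'H') t ≠ [] := List.splitOnP_ne_nil _ t
    obtain ⟨s0, rest, hsp⟩ := List.exists_cons_of_ne_nil hne
    by_cases hH : c = 'H'
    · simp only [List.splitOn, List.splitOnP_cons, hH, beq_self_eq_true, if_true, hsp]
      simp [bGo, mapSegs, ih, List.splitOn, hsp]
    · have hbe : (c == 'H') = false := by simp [hH]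
      simp only [List.splitOn, List.splitOnP_cons, hbe, Bool.false_eq_true, if_false, hsp,
        List.modifyHead]
      rw [mapSegs_cons]
      have h2 := ih (robotStepB st c)
      rw [List.splitOn, hsp, mapSegs_cons] at h2
      simp only [bGo, hH, if_false, h2, List.foldl_cons]

theorem mapSegs_eq_map (l : List (List Char)) :
    mapSegs l robotInitB = l.dropLast.map robotSegRect := by
  induction l with
  | nil => simp [mapSegs]
  | cons seg rest ih =>
    cases rest with
    | nil => simp [mapSegs]
    | cons r rr =>
      simp only [mapSegs, List.dropLast_cons₂, List.map_cons, ih]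
      congr 1

theorem slice_neg_one {α : Type} (l : List α) :
    PySem.List.slice l none (some (-1)) = l.dropLast := by
  simp only [PySem.List.slice, PySem.List.clampIdx, List.dropLast_eq_take]
  cases l with
  | nil => simp
  | cons a t =>
    simp
    split <;> omega

theorem foldl_append_map {α β : Type} (f : α → β) (l : List α) :
    ∀ r, l.foldl (fun acc seg => acc ++ [f seg]) r = r ++ l.map f := by
  induction l with
  | nil => intro r; simp
  | cons a t ih => intro r; simp [ih]

-- the core invariant: B's collected-position lists have A's running extrema as min/max
theorem bGo_eq_specA (cs : List Char) :
    ∀ (x y dx dy : Int) (txs tys : List Int),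
    bGo cs (x, y, dx, dy, 0 :: txs, 0 :: tys) =
      specA cs (txs.foldl min 0, tys.foldl min 0, txs.foldl max 0, tys.foldl max 0, x, y, dx, dy) := by
  induction cs with
  | nil => intro _ _ _ _ _ _; simp [bGo, specA]
  | cons c t ih =>
    intro x y dx dy txs tys
    by_cases hH : c = 'H'
    · simp only [bGo, specA, hH, if_true]
      congr 1
      · simp [rectB, PySem.List.min?_id_cons, PySem.List.max?_id_cons]
      · have := ih 0 0 0 1 [] []
        simpa [robotInitB] using this
    · by_cases hA : c = 'A'
      · subst hA
        have hstep : robotStepB (x, y, dx, dy, 0 :: txs, 0 :: tys) 'A' =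
            (x + dx, y + dy, dx, dy, 0 :: (txs ++ [x + dx]), 0 :: (tys ++ [y + dy])) := by
          simp [robotStepB]
        have hstepA : (robotStepA ([], txs.foldl min 0, tys.foldl min 0, txs.foldl max 0,
            tys.foldl max 0, x, y, dx, dy) 'A').2 =
            (min (x + 1 * dx) (txs.foldl min 0), min (y + 1 * dy) (tys.foldl min 0),
             max (x + 1 * dx) (txs.foldl max 0), max (y + 1 * dy) (tys.foldl max 0),
             x + 1 * dx, y + 1 * dy, dx, dy) := by
          simp [robotStepA]
        simp only [bGo, specA]
        rw [if_neg (by decide), if_neg (by decide), hstep, hstepA]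
        have h1 := ih (x + dx) (y + dy) dx dy (txs ++ [x + dx]) (tys ++ [y + dy])
        rw [h1]
        simp [List.foldl_append, one_mul, min_comm, max_comm]
      · by_cases hE : c = 'E'
        · subst hE
          have hs : robotStepB (x, y, dx, dy, 0 :: txs, 0 :: tys) 'E' =
              (x, y, -dy, dx, 0 :: txs, 0 :: tys) := by simp [robotStepB]
          simp only [bGo, specA]
          rw [if_neg (by decide), if_neg (by decide), hs, ih]
          simp [robotStepA]
        · by_cases hD : c = 'D'
          · subst hD
            have hs : robotStepB (x, y, dx, dy, 0 :: txs, 0 :: tys) 'D' =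
                (x, y, dy, -dx, 0 :: txs, 0 :: tys) := by simp [robotStepB]
            simp only [bGo, specA]
            rw [if_neg (by decide), if_neg (by decide), hs, ih]
            simp [robotStepA]
          · simp only [bGo, specA, hH, if_false]
            have hs : robotStepB (x, y, dx, dy, 0 :: txs, 0 :: tys) c =
                (x, y, dx, dy, 0 :: txs, 0 :: tys) := by simp [robotStepB, hA, hE, hD]
            rw [hs, ih]
            simp [robotStepA, hH, hA, hE, hD]

-- ===== VERDICT (by name: the statement is the Claim_ definition above) =====
theorem robot_spec : Claim_equal_robot := by
  intro comandos _
  unfold Spec_robot robot robot_alt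
  rw [foldA_eq_specA, slice_neg_one, foldl_append_map]
  have h := bGo_eq_specA comandos.toList 0 0 0 1 [] []
  simp only [List.foldl_nil] at h
  rw [← h, bGo_eq_mapSegs]
  have hinit : ((0 : Int), (0 : Int), (0 : Int), (1 : Int), ([0] : List Int), ([0] : List Int)) = robotInitB := rfl
  rw [hinit, mapSegs_eq_map]
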